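-- pv_equiv track=rewrite | github.com/NMX0710/ai-agent | main.py | _select_best_photo_size
-- ===== SOURCE A (Python) =====
-- from typing import Any
--
-- def _select_best_photo_size(photo_sizes: list[dict[str, Any]]) -> dict[str, Any] | None:
--     if not photo_sizes:
--         return None
--
--     def _score(item: dict[str, Any]) -> tuple[int, int]:
--         file_size = item.get("file_size")
--         if isinstance(file_size, int) and file_size > 0:
--             return (file_size, 1)
--         width = item.get("width") if isinstance(item.get("width"), int) else 0
--         height = item.get("height") if isinstance(item.get("height"), int) else 0
--         return (width * height, 0)
--
--     ranked = sorted(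
--         (item for item in photo_sizes if isinstance(item, dict)),
--         key=_score,
--         reverse=True,
--     )
--     return ranked[0] if ranked else None
-- ===== SOURCE B (Python) =====
-- from typing import Any
--
-- def _select_best_photo_size(photo_sizes: list[dict[str, Any]]) -> dict[str, Any] | None:
--     # Right-to-left scan with a single combined integer key 2*value + flag
--     # (flag = 1 for a positive int file_size, else 0 and value = width*height);
--     # accepting on >= while scanning from the right makes the earliest of tied
--     # items win, with no sort and no tuple scores.
--     def key(item: dict[str, Any]) -> int:
--         fs = item.get("file_size")
--         if isinstance(fs, int) and fs > 0:
--             return 2 * fs + 1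
--         w = item.get("width")
--         h = item.get("height")
--         return 2 * (w if isinstance(w, int) else 0) * (h if isinstance(h, int) else 0)
--
--     best = None
--     for item in reversed(photo_sizes):
--         if not isinstance(item, dict):
--             continue
--         if best is None or key(item) >= key(best):
--             best = item
--     return best
-- ===== Notes on version B (the rewrite author's own statement) =====
-- stated objective: alternative
-- what changed: Replaces building and stably reverse-sorting the scored list by tuple keys with a single right-to-left scan keeping a running best under one combined integer key 2*value+flag, accepting on >= so the earliest of tied items still wins.
import Mathlib
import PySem

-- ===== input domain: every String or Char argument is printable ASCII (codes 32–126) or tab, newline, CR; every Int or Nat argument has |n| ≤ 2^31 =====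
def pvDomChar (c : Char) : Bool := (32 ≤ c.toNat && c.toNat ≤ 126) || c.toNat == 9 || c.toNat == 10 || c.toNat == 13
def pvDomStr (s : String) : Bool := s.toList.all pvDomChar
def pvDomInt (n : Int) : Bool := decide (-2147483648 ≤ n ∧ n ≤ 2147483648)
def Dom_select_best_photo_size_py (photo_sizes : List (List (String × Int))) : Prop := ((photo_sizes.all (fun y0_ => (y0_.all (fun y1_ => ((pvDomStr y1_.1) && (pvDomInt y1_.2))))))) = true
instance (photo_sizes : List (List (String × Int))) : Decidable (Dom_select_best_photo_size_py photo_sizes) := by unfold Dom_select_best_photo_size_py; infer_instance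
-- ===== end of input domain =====

-- B replaces the stable reverse sort by tuple scores with one right-to-left scan keeping a
-- running best under a combined integer key 2*value+flag (alternative decomposition, same result).


-- ===== PORT A =====
-- _score: in this typed setting every value is an int, so isinstance(·, int) is
-- 'the key is present'; first-match lookup = dict lookup (generated dicts have unique keys).
def pvScoreA (item : List (String × Int)) : Int × Int :=
  match List.lookup "file_size" item with
  | some fs =>
      if fs > 0 then (fs, 1)
      else (((List.lookup "width" item).getD 0) * ((List.lookup "height" item).getD 0), 0)
  | none => (((List.lookup "width" item).getD 0) * ((List.lookup "height" item).getD 0), 0)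

-- every element is a dict under the type convention, so the isinstance(item, dict) filter keeps all items
def select_best_photo_size_py (photo_sizes : List (List (String × Int))) : Option (List (String × Int)) :=
  if photo_sizes = [] then none
  else
    let ranked := PySem.List.sorted2 photo_sizes (fun i => (pvScoreA i).1) (fun i => (pvScoreA i).2) true
    match ranked with
    | [] => none
    | m :: _ => some m

-- ===== PORT B =====
-- key(item) = 2*value + flag; item.get with the isinstance-int guard collapses to getD 0
def pvKey (item : List (String × Int)) : Int :=
  let fs := (List.lookup "file_size" item).getD 0
  if fs > 0 then 2 * fs + 1
  else 2 * ((List.lookup "width" item).getD 0) * ((List.lookup "height" item).getD 0)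

-- the reversed(photo_sizes) loop: fold over the reversed list, accept on >=
def select_best_photo_size_py_alt (photo_sizes : List (List (String × Int))) : Option (List (String × Int)) :=
  photo_sizes.reverse.foldl
    (fun best item =>
      match best with
      | none => some item
      | some b => if pvKey b ≤ pvKey item then some item else some b)
    none

-- ===== PRECONDITION & SPEC =====
def Spec_select_best_photo_size_py (photo_sizes : List (List (String × Int))) (out : Option (List (String × Int))) : Prop := out = select_best_photo_size_py_alt photo_sizes
instance (photo_sizes : List (List (String × Int))) (out : Option (List (String × Int))) : Decidable (Spec_select_best_photo_size_py photo_sizes out) := by unfold Spec_select_best_photo_size_py; infer_instance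

-- ===== CLAIM (what is proved, stated in full; the proofs are below) =====
def Claim_equal_select_best_photo_size_py : Prop := ∀ (photo_sizes : List (List (String × Int))), Dom_select_best_photo_size_py photo_sizes → Spec_select_best_photo_size_py photo_sizes (select_best_photo_size_py photo_sizes)

-- ===== LEMMAS AND PROOFS =====

-- the strict "score of x beats score of y" comparison (Python's tuple >)
def pvLt (x y : List (String × Int)) : Bool :=
  decide ((pvScoreA y).1 < (pvScoreA x).1 ∨
    ((pvScoreA y).1 = (pvScoreA x).1 ∧ (pvScoreA y).2 < (pvScoreA x).2))

-- one step of a running "first strict maximum" fold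
def pvStep (before : List (String × Int) → List (String × Int) → Bool)
    (o : Option (List (String × Int))) (x : List (String × Int)) : Option (List (String × Int)) :=
  match o with
  | none => some x
  | some y => if before x y then some x else some y

-- B's reversed loop, written as structural recursion (foldr form)
def pvBestR : List (List (String × Int)) → Option (List (String × Int))
  | [] => none
  | x :: t =>
      match pvBestR t with
      | none => some x
      | some y => if pvKey y ≤ pvKey x then some x else some y

-- the head of an insertBy is decided by one comparison with the old head
theorem pv_head?_insertBy (before : List (String × Int) → List (String × Int) → Bool)
    (x : List (String × Int)) (acc : List (List (String × Int))) :
    (PySem.List.insertBy before x acc).head? = pvStep before acc.head? x := by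
  cases acc with
  | nil => rfl
  | cons y ys =>
      simp only [PySem.List.insertBy, pvStep, List.head?_cons]
      split_ifs
      · simp
      · simp

-- the head of the insertion-sort fold is the running-maximum fold
theorem pv_head?_foldl_insertBy (before : List (String × Int) → List (String × Int) → Bool)
    (xs : List (List (String × Int))) (acc : List (List (String × Int))) :
    (xs.foldl (fun acc x => PySem.List.insertBy before x acc) acc).head? =
      xs.foldl (pvStep before) acc.head? := by
  induction xs generalizing acc with
  | nil => rfl
  | cons x t ih =>
      simp only [List.foldl_cons]
      rw [ih, pv_head?_insertBy]

-- Python's tuple order on (value, flag), as the boolean used by the stable sort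
theorem pv_lex_bool (p q r s : Int) :
    (decide (p < q) || (!decide (q < p) && decide (r < s))) =
      decide (p < q ∨ (p = q ∧ r < s)) := by
  by_cases h1 : p < q <;> by_cases h2 : q < p <;> by_cases h3 : r < s <;>
    simp [h1, h2, h3] <;> omega

-- the score's flag is 0 or 1
theorem pvFlag (item : List (String × Int)) : (pvScoreA item).2 = 0 ∨ (pvScoreA item).2 = 1 := by
  unfold pvScoreA
  cases List.lookup "file_size" item with
  | none => simp
  | some fs => by_cases h : fs > 0 <;> simp [h]

-- the combined key encodes the score pair
theorem pvKey_eq (item : List (String × Int)) :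
    pvKey item = 2 * (pvScoreA item).1 + (pvScoreA item).2 := by
  unfold pvKey pvScoreA
  cases List.lookup "file_size" item with
  | none => simp; ring
  | some fs => by_cases h : fs > 0 <;> (simp [h]; try ring)

-- tuple > on scores is exactly > on combined keys
theorem pvLt_eq (x y : List (String × Int)) : pvLt x y = decide (pvKey y < pvKey x) := by
  have hx := pvFlag x
  have hy := pvFlag y
  simp only [pvLt, pvKey_eq, decide_eq_decide]
  rcases hx with hx | hx <;> rcases hy with hy | hy <;> rw [hx, hy] <;> omega

-- "a, improved by the best of the rest" (Python: the seed survives unless strictly beaten)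
def pvTake (a : List (String × Int)) : Option (List (String × Int)) → Option (List (String × Int))
  | none => some a
  | some y => if pvKey a < pvKey y then some y else some a

-- the running strict-max left fold, from any seed, in terms of pvBestR
theorem pv_foldl_acc (xs : List (List (String × Int))) (a : List (String × Int)) :
    xs.foldl (pvStep pvLt) (some a) = pvTake a (pvBestR xs) := by
  induction xs generalizing a with
  | nil => rfl
  | cons x t ih =>
      simp only [List.foldl_cons]
      have hstep : pvStep pvLt (some a) x = if pvKey a < pvKey x then some x else some a := by
        simp [pvStep, pvLt_eq]
      rw [hstep]
      by_cases hax : pvKey a < pvKey x <;>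
        [rw [if_pos hax, ih x]; rw [if_neg hax, ih a]] <;>
        simp only [pvBestR] <;>
        cases hbt : pvBestR t <;>
        · simp only [pvTake]
          split_ifs <;> first | rfl | omega | (simp only [pvTake]; split_ifs <;> first | rfl | omega)

-- A's fold equals B's recursion
theorem pv_fold_eq_bestR (xs : List (List (String × Int))) :
    xs.foldl (pvStep pvLt) none = pvBestR xs := by
  cases xs with
  | nil => rfl
  | cons x t =>
      simp only [List.foldl_cons, pvStep, pvBestR]
      rw [pv_foldl_acc]
      cases hbt : pvBestR t with
      | none => rfl
      | some y => simp only [pvTake]; split_ifs <;> first | rfl | omega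

-- B's port computes pvBestR
theorem pv_alt_eq_bestR (xs : List (List (String × Int))) :
    select_best_photo_size_py_alt xs = pvBestR xs := by
  unfold select_best_photo_size_py_alt
  rw [List.foldl_reverse]
  induction xs with
  | nil => rfl
  | cons x t ih => simp only [List.foldr_cons, pvBestR, ih]

-- ===== VERDICT (by name: the statement is the Claim_ definition above) =====
theorem select_best_photo_size_py_spec : Claim_equal_select_best_photo_size_py := by
  intro xs _
  unfold Spec_select_best_photo_size_py
  rw [pv_alt_eq_bestR]
  unfold select_best_photo_size_py
  cases xs with
  | nil => rfl
  | cons a t =>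
      simp only [if_neg (List.cons_ne_nil a t)]
      have hranked :
          (match PySem.List.sorted2 (a :: t) (fun i => (pvScoreA i).1) (fun i => (pvScoreA i).2) true with
            | [] => (none : Option (List (String × Int)))
            | m :: _ => some m) =
          (PySem.List.sorted2 (a :: t) (fun i => (pvScoreA i).1) (fun i => (pvScoreA i).2) true).head? := by
        cases PySem.List.sorted2 (a :: t) (fun i => (pvScoreA i).1) (fun i => (pvScoreA i).2) true <;> rfl
      rw [hranked]
      have hsorted :
          PySem.List.sorted2 (a :: t) (fun i => (pvScoreA i).1) (fun i => (pvScoreA i).2) true =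
          (a :: t).foldl (fun acc x => PySem.List.insertBy pvLt x acc) [] := by
        show (a :: t).foldl (fun acc x => PySem.List.insertBy
            (fun x y => decide ((pvScoreA y).1 < (pvScoreA x).1) ||
              (!decide ((pvScoreA x).1 < (pvScoreA y).1) && decide ((pvScoreA y).2 < (pvScoreA x).2))) x acc) [] = _
        have hb : (fun (x y : List (String × Int)) => decide ((pvScoreA y).1 < (pvScoreA x).1) ||
              (!decide ((pvScoreA x).1 < (pvScoreA y).1) && decide ((pvScoreA y).2 < (pvScoreA x).2))) = pvLt := by
          funext x y
          rw [pv_lex_bool, pvLt]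
        rw [hb]
      rw [hsorted, pv_head?_foldl_insertBy]
      simp only [List.head?_nil]
      rw [pv_fold_eq_bestR]
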